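-- pv_equiv track=rewrite | github.com/himinyeong2/programmers | bin/mini_tetris.py | solution
-- ===== SOURCE A (Python) =====
-- def get_0_count(arr, row, size):
--     count = 0
--     for i in range(0, size):
--         if(arr[row][i]==0):
--             count+=1
--     return count
--
-- def solution(m,v):
--
--     # v = [2,3,1]
--     answer=0
--     count = 0
--     board=[]
--
--     for i in range(0,m):
--         tmp=[]
--         for j in range(0, m):
--             tmp.append(0)
--         board.append(tmp)
--
--     for x in v:
--         for i in range(0, m):
--             count = get_0_count(board,i,m)
--             if(count>= x):
--                 for j in range(0, x):
--                     board[i][m-count+j]=1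
--                 break
--             else:
--                 continue
--     for i in board:
--         if(i[0]!=0):
--             answer+=1
--     return answer
-- ===== SOURCE B (Python) =====
-- def solution(m, v):
--     # first-fit over per-row remaining-zero counts; no m x m board, no recount
--     caps = [m] * m
--     for x in v:
--         if x <= 0:
--             continue
--         for i in range(len(caps)):
--             if x <= caps[i]:
--                 caps[i] -= x
--                 break
--     return sum(1 for c in caps if c < m)
-- ===== Notes on version B (the rewrite author's own statement) =====
-- stated objective: faster
-- what changed: Replaces the m x m board simulation (rebuilding a zero-count of each row by scanning it for every piece) with a first-fit over a list of per-row remaining capacities, so each piece costs one O(m) scan instead of O(m^2) recounting, and the m^2 board is never built.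
import Mathlib
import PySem

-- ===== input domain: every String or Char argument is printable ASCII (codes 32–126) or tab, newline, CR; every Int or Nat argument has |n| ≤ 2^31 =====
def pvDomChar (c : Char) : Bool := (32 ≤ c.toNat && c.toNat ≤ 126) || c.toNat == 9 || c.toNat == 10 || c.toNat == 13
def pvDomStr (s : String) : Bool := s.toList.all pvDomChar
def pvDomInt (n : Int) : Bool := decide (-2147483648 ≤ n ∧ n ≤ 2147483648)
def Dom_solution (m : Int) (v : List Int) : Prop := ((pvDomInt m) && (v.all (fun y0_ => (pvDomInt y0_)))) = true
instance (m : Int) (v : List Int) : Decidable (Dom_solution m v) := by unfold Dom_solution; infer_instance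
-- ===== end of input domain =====

-- B replaces A's m×m board simulation (re-counting a row's zeros for every row probe) by a
-- first-fit loop over a list of per-row remaining capacities; objective: faster.

-- ===== PORT A =====
-- get_0_count(arr, row, size); whenever A reaches this call all indices are in range,
-- so the out-of-range defaults ([] and 1, the latter counted as non-zero) are never used.
def get0count (arr : List (List Int)) (row : Int) (size : Int) : Int :=
  (PySem.List.pyRange 0 size 1).foldl
    (fun count i => if PySem.List.pyGetD (PySem.List.pyGetD arr row []) i 1 = 0 then count + 1 else count) 0

-- board[i][col] = val; indices are always in range when A executes this assignment
def setCell (b : List (List Int)) (i : Int) (col : Int) (val : Int) : List (List Int) :=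
  PySem.List.pySetD b i (PySem.List.pySetD (PySem.List.pyGetD b i []) col val)

-- A's 'for i in range(0, m): … break / continue' loop, recursing on the index list
def placeLoop (x : Int) (m : Int) (board : List (List Int)) : List Int → List (List Int)
  | [] => board
  | i :: rest =>
    let count := get0count board i m
    if count ≥ x then
      (PySem.List.pyRange 0 x 1).foldl (fun b j => setCell b i (m - count + j) 1) board
    else placeLoop x m board rest

def solution (m : Int) (v : List Int) : Int :=
  let board := (PySem.List.pyRange 0 m 1).foldl
    (fun b _ => b ++ [(PySem.List.pyRange 0 m 1).foldl (fun t _ => t ++ [(0 : Int)]) []]) []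
  let board := v.foldl (fun b x => placeLoop x m b (PySem.List.pyRange 0 m 1)) board
  -- i[0]: in range whenever board is non-empty (its rows then have length m > 0)
  board.foldl (fun a row => if PySem.List.pyGetD row 0 0 ≠ 0 then a + 1 else a) 0

-- ===== PORT B =====
-- Source B's inner 'for i in range(len(caps)): … break' as structural recursion on caps
def firstFit (x : Int) : List Int → List Int
  | [] => []
  | c :: cs => if x ≤ c then (c - x) :: cs else c :: firstFit x cs

def solution_alt (m : Int) (v : List Int) : Int :=
  let caps := v.foldl (fun cs x => if x ≤ 0 then cs else firstFit x cs) (List.replicate m.toNat m)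
  caps.foldl (fun a c => if c < m then a + 1 else a) 0

-- ===== PRECONDITION & SPEC =====
def Spec_solution (m : Int) (v : List Int) (out : Int) : Prop := out = solution_alt m v
instance (m : Int) (v : List Int) (out : Int) : Decidable (Spec_solution m v out) := by unfold Spec_solution; infer_instance

-- ===== CLAIM (what is proved, stated in full; the proofs are below) =====
def Claim_equal_solution : Prop := ∀ (m : Int) (v : List Int), Dom_solution m v → Spec_solution m v (solution m v)

-- ===== LEMMAS AND PROOFS =====

-- abstraction: a board row with c remaining zeros (the filled cells are a prefix of 1s)
def rowOf (m c : Int) : List Int := List.replicate (m - c).toNat 1 ++ List.replicate c.toNat 0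

theorem pyGetD_prefix (pre : List (List Int)) (b : List Int) (l : List (List Int)) :
    PySem.List.pyGetD (pre ++ b :: l) (pre.length : Int) [] = b := by
  simp [PySem.List.pyGetD_natCast]

theorem pySetD_prefix (pre : List (List Int)) (b : List Int) (l : List (List Int)) (v : List Int) :
    PySem.List.pySetD (pre ++ b :: l) (pre.length : Int) v = pre ++ v :: l := by
  simp

theorem get0count_rowOf {m c : Int} (L : List (List Int)) (k : Int)
    (h0 : 0 ≤ c) (h1 : c ≤ m) (hk : PySem.List.pyGetD L k [] = rowOf m c) :
    get0count L k m = c := by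
  unfold get0count
  rw [hk]
  obtain ⟨r, hr⟩ : ∃ r, rowOf m c = r := ⟨_, rfl⟩
  have hm : (r.length : Int) = m := by simp [← hr, rowOf]; omega
  rw [hr, ← hm,
    PySem.List.foldl_pyRange_zero_pyGetD' r 1 (fun count e => if e = 0 then count + 1 else count) 0,
    PySem.List.foldl_ite_add_one]
  simp [← hr, rowOf, List.countP_append, List.countP_replicate]
  omega

theorem head_rowOf_lt {m c : Int} (h : c < m) : PySem.List.pyGetD (rowOf m c) 0 0 = 1 := by
  have h2 : (m - c).toNat = (m - c - 1).toNat + 1 := by omega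
  rw [rowOf, h2, List.replicate_succ, PySem.List.pyGetD_of_nonneg _ _ (by omega)]
  simp

theorem head_rowOf_full {m : Int} : PySem.List.pyGetD (rowOf m m) 0 0 = 0 := by
  rw [rowOf, PySem.List.pyGetD_of_nonneg _ _ (by omega)]
  cases hn : m.toNat with
  | zero => simp
  | succ n => simp [List.replicate_succ]

-- filling one cell at the first remaining zero turns a row with c-t zeros into one with c-t-1
theorem set_rowOf {m c t : Int} (h0 : 0 ≤ t) (h1 : t < c) (h2 : c ≤ m) :
    PySem.List.pySetD (rowOf m (c - t)) (m - c + t) 1 = rowOf m (c - (t + 1)) := by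
  rw [PySem.List.pySetD_of_nonneg _ _ (by omega)]
  have ha : (m - (c - t)).toNat = (m - c + t).toNat := by omega
  have hb : (c - t).toNat = (c - (t+1)).toNat + 1 := by omega
  have hc : (m - (c - (t+1))).toNat = (m - c + t).toNat + 1 := by omega
  rw [rowOf, rowOf, ha, hb, hc, List.replicate_succ, List.replicate_succ']
  rw [show ((m-c+t).toNat) = (List.replicate (m - c + t).toNat (1:Int)).length by simp]
  simp

-- A's inner fill loop 'for j in range(0, x)' on the row at position pre.length
theorem fill_rowOf {m c x : Int} (pre cs : List (List Int)) (hx : x ≤ c) (hc : c ≤ m) :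
    ∀ (n : Nat) (t : Int), 0 ≤ t → t ≤ x → (x - t).toNat = n →
    (PySem.List.pyRange t x 1).foldl
      (fun b j => setCell b (pre.length : Int) (m - c + j) 1)
      (pre ++ rowOf m (c - t) :: cs)
    = pre ++ rowOf m (c - x) :: cs := by
  intro n
  induction n with
  | zero =>
    intro t ht0 ht1 hn
    have : t = x := by omega
    subst this
    rw [PySem.List.pyRange_one_eq_nil (by omega)]
    rfl
  | succ n ih =>
    intro t ht0 ht1 hn
    have htx : t < x := by omega
    rw [PySem.List.pyRange_one_cons (by omega), List.foldl_cons]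
    have hstep : setCell (pre ++ rowOf m (c - t) :: cs) (pre.length : Int) (m - c + t) 1
        = pre ++ rowOf m (c - (t + 1)) :: cs := by
      rw [setCell, pyGetD_prefix, set_rowOf ht0 (by omega) hc, pySetD_prefix]
    rw [hstep]
    exact ih (t + 1) (by omega) (by omega) (by omega)

theorem firstFit_length (x : Int) (cs : List Int) : (firstFit x cs).length = cs.length := by
  induction cs with
  | nil => rfl
  | cons c cs ih => by_cases h : x ≤ c <;> simp [firstFit, h, ih]

theorem firstFit_inv {m x : Int} (hx : 0 < x) (cs : List Int)
    (hinv : ∀ c ∈ cs, 0 ≤ c ∧ c ≤ m) : ∀ c ∈ firstFit x cs, 0 ≤ c ∧ c ≤ m := by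
  induction cs with
  | nil => simp [firstFit]
  | cons c cs ih =>
    have hc := hinv c (by simp)
    by_cases h : x ≤ c
    · intro d hd
      simp [firstFit, h] at hd
      rcases hd with hd | hd
      · omega
      · exact hinv d (by simp [hd])
    · intro d hd
      simp [firstFit, h] at hd
      rcases hd with hd | hd
      · exact hinv d (by simp [hd])
      · exact ih (fun e he => hinv e (by simp [he])) d hd

-- A's row scan (with break) agrees with B's first-fit, for a positive piece
theorem placeLoop_firstFit {m x : Int} (hx : 0 < x) :
    ∀ (cs pre : List Int), (∀ c ∈ cs, 0 ≤ c ∧ c ≤ m) → pre.length + cs.length = m.toNat →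
    placeLoop x m ((pre ++ cs).map (rowOf m)) (PySem.List.pyRange (pre.length : Int) m 1)
      = (pre ++ firstFit x cs).map (rowOf m) := by
  intro cs
  induction cs with
  | nil =>
    intro pre _ hlen
    rw [PySem.List.pyRange_one_eq_nil (by simp at hlen; omega)]
    rfl
  | cons c cs ih =>
    intro pre hinv hlen
    have hcm : (pre.length : Int) < m := by simp at hlen; omega
    have hc := hinv c (by simp)
    rw [PySem.List.pyRange_one_cons hcm]
    have hboard : (pre ++ c :: cs).map (rowOf m)
        = pre.map (rowOf m) ++ rowOf m c :: cs.map (rowOf m) := by simp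
    have hget : PySem.List.pyGetD ((pre ++ c :: cs).map (rowOf m)) (pre.length : Int) [] = rowOf m c := by
      rw [hboard, show (pre.length : Int) = ((pre.map (rowOf m)).length : Int) by simp]
      exact pyGetD_prefix _ _ _
    have hcount : get0count ((pre ++ c :: cs).map (rowOf m)) (pre.length : Int) m = c :=
      get0count_rowOf _ _ hc.1 hc.2 hget
    show placeLoop x m _ (_ :: _) = _
    rw [placeLoop]
    simp only [hcount]
    by_cases hxc : x ≤ c
    · rw [if_pos (by omega)]
      have := fill_rowOf (m := m) (c := c) (x := x) (pre.map (rowOf m)) (cs.map (rowOf m)) hxc hc.2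
        (x).toNat 0 (by omega) (by omega) (by omega)
      simp only [sub_zero] at this
      rw [hboard, show (pre.length : Int) = ((pre.map (rowOf m)).length : Int) by simp, this,
        firstFit, if_pos hxc]
      simp
    · rw [if_neg (by omega)]
      have hrec := ih (pre ++ [c]) (fun d hd => hinv d (by simp [hd])) (by simp at hlen ⊢; omega)
      rw [show ((pre ++ [c]).length : Int) = (pre.length : Int) + 1 by simp] at hrec
      rw [show (pre ++ [c]) ++ cs = pre ++ c :: cs by simp] at hrec
      rw [hrec, firstFit, if_neg hxc]
      simp

-- a non-positive piece is "placed" at row 0 with an empty fill loop: the board is unchanged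
theorem placeLoop_nonpos {m x : Int} (hx : x ≤ 0) (caps : List Int)
    (hinv : ∀ c ∈ caps, 0 ≤ c ∧ c ≤ m) (hlen : caps.length = m.toNat) :
    placeLoop x m (caps.map (rowOf m)) (PySem.List.pyRange 0 m 1) = caps.map (rowOf m) := by
  by_cases hm : m ≤ 0
  · rw [PySem.List.pyRange_one_eq_nil (by omega)]
    rfl
  · rw [PySem.List.pyRange_one_cons (by omega)]
    cases caps with
    | nil => simp at hlen; omega
    | cons c cs =>
      have hc := hinv c (by simp)
      have hget : PySem.List.pyGetD ((c :: cs).map (rowOf m)) 0 [] = rowOf m c := by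
        simp [PySem.List.pyGetD_ofNat']
      have hcount := get0count_rowOf ((c :: cs).map (rowOf m)) 0 hc.1 hc.2 hget
      rw [placeLoop]
      simp only [hcount]
      rw [if_pos (by omega : c ≥ x), PySem.List.pyRange_one_eq_nil hx]
      rfl

theorem count_rows {m : Int} (caps : List Int) :
    ∀ (a : Int), (∀ c ∈ caps, 0 ≤ c ∧ c ≤ m) →
    (caps.map (rowOf m)).foldl (fun a row => if PySem.List.pyGetD row 0 0 ≠ 0 then a + 1 else a) a
      = caps.foldl (fun a c => if c < m then a + 1 else a) a := by
  induction caps with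
  | nil => intro a _; rfl
  | cons c cs ih =>
    intro a hinv
    have hc := hinv c (by simp)
    simp only [List.map_cons, List.foldl_cons]
    rw [ih _ (fun d hd => hinv d (by simp [hd]))]
    congr 1
    by_cases hlt : c < m
    · rw [head_rowOf_lt hlt]; simp [hlt]
    · have : c = m := by omega
      subst this
      rw [head_rowOf_full]; simp

theorem build_board (m : Int) :
    (PySem.List.pyRange 0 m 1).foldl
      (fun b _ => b ++ [(PySem.List.pyRange 0 m 1).foldl (fun t _ => t ++ [(0 : Int)]) []]) []
    = (List.replicate m.toNat m).map (rowOf m) := by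
  have hrow : (PySem.List.pyRange 0 m 1).foldl (fun t _ => t ++ [(0 : Int)]) []
      = List.replicate m.toNat 0 := by
    rw [PySem.List.foldl_append_singleton_eq_map]
    simp [List.map_const', PySem.List.length_pyRange_one]
  rw [hrow, PySem.List.foldl_append_singleton_eq_map]
  simp [List.map_const', PySem.List.length_pyRange_one, List.map_replicate, rowOf]

theorem main_loop {m : Int} (v : List Int) :
    ∀ (caps : List Int), (∀ c ∈ caps, 0 ≤ c ∧ c ≤ m) → caps.length = m.toNat →
    v.foldl (fun b x => placeLoop x m b (PySem.List.pyRange 0 m 1)) (caps.map (rowOf m))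
      = (v.foldl (fun cs x => if x ≤ 0 then cs else firstFit x cs) caps).map (rowOf m) := by
  induction v with
  | nil => intro caps _ _; rfl
  | cons x v ih =>
    intro caps hinv hlen
    simp only [List.foldl_cons]
    by_cases hx : x ≤ 0
    · rw [placeLoop_nonpos hx caps hinv hlen, if_pos hx]
      exact ih caps hinv hlen
    · have hx' : 0 < x := by omega
      have hstep := placeLoop_firstFit hx' caps [] hinv (by simpa using hlen)
      simp only [List.nil_append, List.length_nil, Nat.cast_zero] at hstep
      rw [hstep, if_neg hx]
      exact ih _ (firstFit_inv hx' caps hinv) (by rw [firstFit_length]; exact hlen)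

theorem loop_inv {m : Int} (v : List Int) :
    ∀ caps, (∀ c ∈ caps, 0 ≤ c ∧ c ≤ m) →
    ∀ c ∈ v.foldl (fun cs x => if x ≤ 0 then cs else firstFit x cs) caps, 0 ≤ c ∧ c ≤ m := by
  induction v with
  | nil => intro caps h; exact h
  | cons x v ih =>
    intro caps h
    simp only [List.foldl_cons]
    by_cases hx : x ≤ 0
    · rw [if_pos hx]; exact ih caps h
    · rw [if_neg hx]; exact ih _ (firstFit_inv (by omega) caps h)

-- ===== VERDICT (by name: the statement is the Claim_ definition above) =====
theorem solution_spec : Claim_equal_solution := by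
  intro m v _
  show solution m v = solution_alt m v
  simp only [solution, solution_alt]
  have hinv : ∀ c ∈ List.replicate m.toNat m, 0 ≤ c ∧ c ≤ m := by
    intro c hc
    rw [List.mem_replicate] at hc
    omega
  rw [build_board m, main_loop v _ hinv (by simp)]
  exact count_rows _ 0 (loop_inv v _ hinv)
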